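-- pv_equiv track=rewrite | github.com/StryCodr/Connect-4-Game | Connect 4 game.py | diagonal_equal
-- ===== SOURCE A (Python) =====
-- def diagonal_equal(diagonal, player):
--     count = 0
--     for cell in diagonal:
--         if cell == player:
--             count += 1
--             if count == 4:
--                 return True
--         else:
--             count = 0
--     return False
-- ===== SOURCE B (Python) =====
-- from itertools import groupby
--
--
-- def diagonal_equal(diagonal, player):
--     for key, group in groupby(diagonal):
--         if key == player and sum(1 for _ in group) >= 4:
--             return True
--     return False
-- ===== Notes on version B (the rewrite author's own statement) =====
-- stated objective: idiomatic
-- what changed: Replaces the running counter with reset by itertools.groupby: split the diagonal into maximal runs of equal cells and test whether some run of the player's cells has length at least 4.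
import Mathlib
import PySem

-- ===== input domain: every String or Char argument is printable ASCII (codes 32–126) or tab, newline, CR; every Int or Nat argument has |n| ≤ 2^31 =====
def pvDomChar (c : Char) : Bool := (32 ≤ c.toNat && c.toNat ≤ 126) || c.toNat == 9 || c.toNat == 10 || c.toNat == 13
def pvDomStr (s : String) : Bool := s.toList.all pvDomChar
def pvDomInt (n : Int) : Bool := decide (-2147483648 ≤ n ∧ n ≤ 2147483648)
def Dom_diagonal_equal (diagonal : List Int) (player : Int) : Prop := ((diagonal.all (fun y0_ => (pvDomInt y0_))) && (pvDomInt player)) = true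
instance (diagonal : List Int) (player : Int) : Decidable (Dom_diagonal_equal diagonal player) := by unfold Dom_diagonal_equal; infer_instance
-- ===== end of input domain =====

-- B replaces A's running counter-with-reset by a groupby-style run decomposition (idiomatic; same O(n) cost).

-- ===== PORT A =====
-- A's loop with early return, as structural recursion over the list carrying `count`.
def pvGoA (player : Int) : List Int → Nat → Bool
  | [], _ => false
  | cell :: rest, count =>
    if cell == player then
      if count + 1 == 4 then true else pvGoA player rest (count + 1)
    else pvGoA player rest 0

def diagonal_equal (diagonal : List Int) (player : Int) : Bool :=
  pvGoA player diagonal 0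

-- ===== PORT B =====
-- itertools.groupby(diagonal) yields the maximal runs of equal cells; pvRuns computes
-- exactly that run decomposition as (key, run length) pairs.
def pvRuns : List Int → List (Int × Nat)
  | [] => []
  | x :: xs =>
    match pvRuns xs with
    | (k, n) :: rest => if k == x then (k, n + 1) :: rest else (x, 1) :: (k, n) :: rest
    | [] => [(x, 1)]

-- the loop body `if key == player and sum(1 for _ in group) >= 4: return True` / `return False`
def diagonal_equal_alt (diagonal : List Int) (player : Int) : Bool :=
  (pvRuns diagonal).any (fun r => r.1 == player && decide (4 ≤ r.2))

-- ===== PRECONDITION & SPEC =====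
def Spec_diagonal_equal (diagonal : List Int) (player : Int) (out : Bool) : Prop := out = diagonal_equal_alt diagonal player
instance (diagonal : List Int) (player : Int) (out : Bool) : Decidable (Spec_diagonal_equal diagonal player out) := by unfold Spec_diagonal_equal; infer_instance

-- ===== CLAIM (what is proved, stated in full; the proofs are below) =====
def Claim_equal_diagonal_equal : Prop := ∀ (diagonal : List Int) (player : Int), Dom_diagonal_equal diagonal player → Spec_diagonal_equal diagonal player (diagonal_equal diagonal player)

-- ===== LEMMAS AND PROOFS =====

lemma pv_bool_iff {a b : Bool} (h : a = true ↔ b = true) : a = b := by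
  cases a <;> cases b <;> simp_all

-- "the first run (if it is the player's) extended by c pending matches reaches 4"
def pvHeadBoost (player : Int) (c : Nat) : List (Int × Nat) → Bool
  | (k, n) :: _ => k == player && decide (4 ≤ c + n)
  | [] => false

lemma pvGoA_runs (player : Int) :
    ∀ (l : List Int) (c : Nat), c ≤ 3 →
      pvGoA player l c
        = (pvHeadBoost player c (pvRuns l)
            || (pvRuns l).any (fun r => r.1 == player && decide (4 ≤ r.2))) := by
  intro l
  induction l with
  | nil => intro c _; simp [pvGoA, pvRuns, pvHeadBoost]
  | cons x xs ih =>
    intro c hc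
    apply pv_bool_iff
    by_cases hx : x = player
    · subst hx
      by_cases h4 : c + 1 = 4
      · -- early return: c = 3, and the first run of x :: xs has key x = player, length ≥ 1
        have hgo : pvGoA x (x :: xs) c = true := by
          simp [pvGoA, h4]
        rw [hgo]
        simp only [true_iff, Bool.or_eq_true]
        left
        simp only [pvRuns]
        rcases hr : pvRuns xs with _ | ⟨⟨k, n⟩, rest⟩
        · simp [pvHeadBoost]; omega
        · by_cases hk : k = x <;> simp [hk, pvHeadBoost] <;> omega
      · have hgo : pvGoA x (x :: xs) c = pvGoA x xs (c + 1) := by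
          simp only [pvGoA, beq_self_eq_true, if_true]
          rw [if_neg (by simp; omega)]
        rw [hgo, ih (c + 1) (by omega)]
        simp only [pvRuns]
        rcases hr : pvRuns xs with _ | ⟨⟨k, n⟩, rest⟩
        · -- xs has no runs, i.e. xs = []
          simp [pvHeadBoost]
          omega
        · by_cases hk : k = x
          · subst hk
            simp only [pvHeadBoost, beq_self_eq_true, Bool.true_and, Bool.or_eq_true,
              List.any_cons, decide_eq_true_iff]
            constructor
            · rintro (h | h)
              · left; simpa using (by omega : 4 ≤ c + (n + 1))
              · rcases (by simpa using h : 4 ≤ n ∨ rest.any (fun r => r.1 == k && decide (4 ≤ r.2)) = true) with h' | h'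
                · left; simpa using (by omega : 4 ≤ c + (n + 1))
                · right; simp [h']
            · rintro (h | h)
              · have : 4 ≤ c + (n + 1) := by simpa using h
                left; simpa using (by omega : 4 ≤ c + 1 + n)
              · rcases (by simpa using h : 4 ≤ n + 1 ∨ rest.any (fun r => r.1 == k && decide (4 ≤ r.2)) = true) with h' | h'
                · left; simpa using (by omega : 4 ≤ c + 1 + n)
                · right; simp [h']
          · have hkx : (k == x) = false := by simp [hk]
            have hkp : (k == x) = false := hkx
            simp only [hkx, Bool.false_eq_true, if_false]
            simp only [pvHeadBoost, List.any_cons, hkx, Bool.false_and, Bool.false_or,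
              beq_self_eq_true, Bool.true_and, Bool.or_eq_true, decide_eq_true_iff]
            constructor
            · intro h
              right; right; exact h
            · rintro (h | h)
              · exact absurd h (by omega)
              · rcases h with h | h
                · exact absurd h (by omega)
                · exact h
    · have hxp : (x == player) = false := by simp [hx]
      have hgo : pvGoA player (x :: xs) c = pvGoA player xs 0 := by
        simp [pvGoA, hxp]
      rw [hgo, ih 0 (by omega)]
      simp only [pvRuns]
      rcases hr : pvRuns xs with _ | ⟨⟨k, n⟩, rest⟩
      · simp [pvHeadBoost, hxp]
      · by_cases hk : k = x
        · subst hk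
          simp only [if_pos rfl]
          simp [pvHeadBoost, hxp]
        · have hkx : (k == x) = false := by simp [hk]
          simp only [hkx, Bool.false_eq_true, if_false]
          simp only [pvHeadBoost, List.any_cons, hxp, Bool.false_and, Bool.false_or,
            Nat.zero_add, Bool.or_eq_true, Bool.and_eq_true, decide_eq_true_iff]
          tauto

-- ===== VERDICT (by name: the statement is the Claim_ definition above) =====
theorem diagonal_equal_spec : Claim_equal_diagonal_equal := by
  intro diagonal player _
  unfold Spec_diagonal_equal diagonal_equal diagonal_equal_alt
  rw [pvGoA_runs player diagonal 0 (by omega)]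
  apply pv_bool_iff
  rcases hr : pvRuns diagonal with _ | ⟨⟨k, n⟩, rest⟩
  · simp [pvHeadBoost]
  · simp only [pvHeadBoost, List.any_cons, Nat.zero_add, Bool.or_eq_true]
    tauto
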